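-- pv_equiv track=rewrite | github.com/timehistoryworld/uvvisanalyzer | uvvis_analyzer.py | science_note
-- ===== SOURCE A (Python) =====
-- def science_note(nm, kind):
--     regions = {
--         (200, 250): "π→π* transition (aromatic / conjugated system)",
--         (250, 300): "π→π* / n→π* overlap region",
--         (300, 400): "n→π* transition (carbonyl / heteroatom lone pair)",
--         (400, 500): "Visible — charge-transfer or extended conjugation",
--         (500, 700): "d→d transition or extended chromophore",
--         (700, 900): "NIR-edge — radical, metal complex, or ICT state",
--     }
--     if kind == 'max':
--         for (lo, hi), txt in regions.items():
--             if lo <= nm < hi: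
--                 return txt
--         return "Strong absorption feature"
--     if kind == 'd1_zero':
--         return "Inflection point — shoulder / hidden sub-band boundary"
--     if kind == 'd2_min':
--         return "Hidden peak or vibronic shoulder (2nd-deriv minimum)"
--     return ""
-- ===== SOURCE B (Python) =====
-- import bisect
--
-- _BREAKPOINTS = [200, 250, 300, 400, 500, 700, 900]
-- _TEXTS = [
--     "\u03c0\u2192\u03c0* transition (aromatic / conjugated system)",
--     "\u03c0\u2192\u03c0* / n\u2192\u03c0* overlap region",
--     "n\u2192\u03c0* transition (carbonyl / heteroatom lone pair)",
--     "Visible \u2014 charge-transfer or extended conjugation",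
--     "d\u2192d transition or extended chromophore",
--     "NIR-edge \u2014 radical, metal complex, or ICT state",
-- ]
--
-- def science_note(nm, kind):
--     if kind == 'max':
--         idx = bisect.bisect_right(_BREAKPOINTS, nm) - 1
--         if 0 <= idx < len(_TEXTS):
--             return _TEXTS[idx]
--         return "Strong absorption feature"
--     if kind == 'd1_zero':
--         return "Inflection point \u2014 shoulder / hidden sub-band boundary"
--     if kind == 'd2_min':
--         return "Hidden peak or vibronic shoulder (2nd-deriv minimum)"
--     return ""
-- ===== Notes on version B (the rewrite author's own statement) =====
-- stated objective: idiomatic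
-- what changed: Replaces the linear scan over (lo,hi) range keys with a binary-search index lookup (bisect_right on a sorted breakpoint list indexing a parallel list of texts).
import Mathlib
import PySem

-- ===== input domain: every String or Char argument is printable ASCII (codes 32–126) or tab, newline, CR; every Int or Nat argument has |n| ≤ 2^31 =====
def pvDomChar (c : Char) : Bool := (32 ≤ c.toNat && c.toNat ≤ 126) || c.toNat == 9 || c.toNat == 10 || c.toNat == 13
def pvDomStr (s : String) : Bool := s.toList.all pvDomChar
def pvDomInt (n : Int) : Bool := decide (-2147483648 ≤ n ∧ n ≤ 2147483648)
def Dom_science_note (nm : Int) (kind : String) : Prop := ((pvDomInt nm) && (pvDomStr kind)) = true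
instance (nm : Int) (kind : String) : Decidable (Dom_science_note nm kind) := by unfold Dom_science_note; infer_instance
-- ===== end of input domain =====

-- B replaces A's linear scan over (lo,hi) range keys with a bisect_right lookup in a
-- sorted breakpoint list indexing a parallel list of texts (idiomatic; same behaviour).

-- ===== PORT A =====
-- the regions dict of A, in insertion order: ((lo, hi), text)
def pvRegionsA : List ((Int × Int) × String) :=
  [((200, 250), "π→π* transition (aromatic / conjugated system)"),
   ((250, 300), "π→π* / n→π* overlap region"),
   ((300, 400), "n→π* transition (carbonyl / heteroatom lone pair)"),
   ((400, 500), "Visible — charge-transfer or extended conjugation"),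
   ((500, 700), "d→d transition or extended chromophore"),
   ((700, 900), "NIR-edge — radical, metal complex, or ICT state")]

-- the 'for (lo, hi), txt in regions.items(): if lo <= nm < hi: return txt' loop
def pvScanA : List ((Int × Int) × String) → Int → Option String
  | [], _ => none
  | ((lo, hi), txt) :: rest, nm =>
      if lo ≤ nm ∧ nm < hi then some txt else pvScanA rest nm

def science_note (nm : Int) (kind : String) : String :=
  if kind = "max" then
    match pvScanA pvRegionsA nm with
    | some txt => txt
    | none => "Strong absorption feature"
  else if kind = "d1_zero" then
    "Inflection point — shoulder / hidden sub-band boundary"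
  else if kind = "d2_min" then
    "Hidden peak or vibronic shoulder (2nd-deriv minimum)"
  else ""

-- ===== PORT B =====
def pvBreakpoints : List Int := [200, 250, 300, 400, 500, 700, 900]

def pvTexts : List String :=
  ["π→π* transition (aromatic / conjugated system)",
   "π→π* / n→π* overlap region",
   "n→π* transition (carbonyl / heteroatom lone pair)",
   "Visible — charge-transfer or extended conjugation",
   "d→d transition or extended chromophore",
   "NIR-edge — radical, metal complex, or ICT state"]

def science_note_alt (nm : Int) (kind : String) : String :=
  if kind = "max" then
    let idx : Int := (PySem.List.bisectRight pvBreakpoints nm : Int) - 1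
    if 0 ≤ idx ∧ idx < 6 then
      (PySem.List.pyGet? pvTexts idx).getD "Strong absorption feature"  -- in range by the guard
    else "Strong absorption feature"
  else if kind = "d1_zero" then
    "Inflection point — shoulder / hidden sub-band boundary"
  else if kind = "d2_min" then
    "Hidden peak or vibronic shoulder (2nd-deriv minimum)"
  else ""

-- ===== PRECONDITION & SPEC =====
def Spec_science_note (nm : Int) (kind : String) (out : String) : Prop := out = science_note_alt nm kind
instance (nm : Int) (kind : String) (out : String) : Decidable (Spec_science_note nm kind out) := by unfold Spec_science_note; infer_instance

-- ===== CLAIM (what is proved, stated in full; the proofs are below) =====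
def Claim_equal_science_note : Prop := ∀ (nm : Int) (kind : String), Dom_science_note nm kind → Spec_science_note nm kind (science_note nm kind)

-- ===== LEMMAS AND PROOFS =====

lemma pvBisect_val (nm : Int) :
    (PySem.List.bisectRight pvBreakpoints nm : Int) =
      if nm < 200 then 0 else if nm < 250 then 1 else if nm < 300 then 2
      else if nm < 400 then 3 else if nm < 500 then 4 else if nm < 700 then 5
      else if nm < 900 then 6 else 7 := by
  obtain ⟨hle, hlo, hhi⟩ :=
    PySem.List.bisectRight_spec pvBreakpoints nm (by decide)
  set r := PySem.List.bisectRight pvBreakpoints nm with hr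
  have l0 := hlo 0 (by decide); have l1 := hlo 1 (by decide)
  have l2 := hlo 2 (by decide); have l3 := hlo 3 (by decide)
  have l4 := hlo 4 (by decide); have l5 := hlo 5 (by decide)
  have l6 := hlo 6 (by decide)
  have u0 := hhi 0 (by decide); have u1 := hhi 1 (by decide)
  have u2 := hhi 2 (by decide); have u3 := hhi 3 (by decide)
  have u4 := hhi 4 (by decide); have u5 := hhi 5 (by decide)
  have u6 := hhi 6 (by decide)
  simp only [pvBreakpoints, List.length_cons, List.length_nil,
    List.getElem_cons_zero, List.getElem_cons_succ] at hle l0 l1 l2 l3 l4 l5 l6 u0 u1 u2 u3 u4 u5 u6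
  split_ifs <;> omega

lemma pvScan_val (nm : Int) :
    pvScanA pvRegionsA nm =
      if nm < 200 then none
      else if nm < 250 then some "π→π* transition (aromatic / conjugated system)"
      else if nm < 300 then some "π→π* / n→π* overlap region"
      else if nm < 400 then some "n→π* transition (carbonyl / heteroatom lone pair)"
      else if nm < 500 then some "Visible — charge-transfer or extended conjugation"
      else if nm < 700 then some "d→d transition or extended chromophore"
      else if nm < 900 then some "NIR-edge — radical, metal complex, or ICT state"
      else none := by
  simp only [pvRegionsA, pvScanA]
  split_ifs <;> first | rfl | omega

-- ===== VERDICT (by name: the statement is the Claim_ definition above) =====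
theorem science_note_spec : Claim_equal_science_note := by
  intro nm kind _
  show science_note nm kind = science_note_alt nm kind
  unfold science_note science_note_alt
  by_cases hk : kind = "max"
  · simp only [hk, pvScan_val, pvBisect_val]
    split_ifs <;> first | rfl | omega
  · simp only [if_neg hk]
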